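-- pv_equiv track=rewrite | github.com/Athelbiban/learner | codewars.com/7kyu_Mountains_of_Hoiyama.py | mountains_of_hoiyama
-- ===== SOURCE A (Python) =====
-- def mountains_of_hoiyama(width):
--     weight = width
--     number_of_layers = width // 2 + 1
--     for h in range(number_of_layers, width):
--         weight_layer = h
--         for w in range(width // 2, 0, -1):
--             weight_layer += w * 2
--         weight += weight_layer
--     return weight
-- ===== SOURCE B (Python) =====
-- def mountains_of_hoiyama(width):
--     # Closed form: k = width//2, m = number of extra layers; arithmetic series instead of loops.
--     k = width // 2
--     m = width - k - 1
--     if m <= 0: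
--         return width
--     return width + m * k * (k + 1) + m * (2 * k + m + 1) // 2
-- ===== Notes on version B (the rewrite author's own statement) =====
-- stated objective: faster
-- what changed: Replaced the nested loops by closed-form arithmetic-series formulas for the inner sum and the sum of layer heads, computed in constant time.
import Mathlib
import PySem

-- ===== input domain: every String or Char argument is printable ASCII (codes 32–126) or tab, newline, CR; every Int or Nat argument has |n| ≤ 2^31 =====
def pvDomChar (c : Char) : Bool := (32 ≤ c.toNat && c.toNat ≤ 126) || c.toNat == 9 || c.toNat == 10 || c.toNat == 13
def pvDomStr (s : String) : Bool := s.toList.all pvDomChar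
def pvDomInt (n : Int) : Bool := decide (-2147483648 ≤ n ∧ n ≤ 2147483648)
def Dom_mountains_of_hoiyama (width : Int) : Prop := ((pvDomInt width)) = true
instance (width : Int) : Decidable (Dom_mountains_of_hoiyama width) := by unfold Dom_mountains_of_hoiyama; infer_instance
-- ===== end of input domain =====

-- B replaces A's nested loops by a closed-form arithmetic-series formula (O(1) instead of O(width^2)).

-- ===== PORT A =====
def mountains_of_hoiyama (width : Int) : Int :=
  let weight := width
  let number_of_layers := PySem.Int.floordiv width 2 + 1
  (PySem.List.pyRange number_of_layers width 1).foldl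
    (fun weight h =>
      let weight_layer :=
        (PySem.List.pyRange (PySem.Int.floordiv width 2) 0 (-1)).foldl
          (fun weight_layer w => weight_layer + w * 2) h
      weight + weight_layer)
    weight

-- ===== PORT B =====
def mountains_of_hoiyama_alt (width : Int) : Int :=
  let k := PySem.Int.floordiv width 2
  let m := width - k - 1
  if m ≤ 0 then width
  else width + m * k * (k + 1) + PySem.Int.floordiv (m * (2 * k + m + 1)) 2

-- ===== PRECONDITION & SPEC =====
def Spec_mountains_of_hoiyama (width : Int) (out : Int) : Prop := out = mountains_of_hoiyama_alt width
instance (width : Int) (out : Int) : Decidable (Spec_mountains_of_hoiyama width out) := by unfold Spec_mountains_of_hoiyama; infer_instance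

-- ===== CLAIM (what is proved, stated in full; the proofs are below) =====
def Claim_equal_mountains_of_hoiyama : Prop := ∀ (width : Int), Dom_mountains_of_hoiyama width → Spec_mountains_of_hoiyama width (mountains_of_hoiyama width)

-- ===== LEMMAS AND PROOFS =====

-- Inner loop of A: starting from h, adding w*2 for w = k, k-1, …, 1 yields h + k*(k+1).
lemma pv_inner (n : Nat) : ∀ h : Int,
    (PySem.List.pyRange (n : Int) 0 (-1)).foldl (fun acc w => acc + w * 2) h
      = h + (n : Int) * ((n : Int) + 1) := by
  induction n with
  | zero => intro h; simp [PySem.List.pyRange_neg_one_eq_nil]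
  | succ n ih =>
    intro h
    rw [PySem.List.pyRange_neg_one_cons (by exact_mod_cast Nat.succ_pos n)]
    simp only [List.foldl_cons]
    have : ((n : Int) + 1 - 1) = (n : Int) := by ring
    rw [show ((n + 1 : Nat) : Int) - 1 = (n : Int) by push_cast; ring]
    rw [ih]
    push_cast; ring

-- Outer loop shape: folding acc + (h + c) over pyRange a (a+n) 1, doubled to avoid division.
lemma pv_outer (c : Int) (n : Nat) : ∀ (a init : Int),
    2 * (PySem.List.pyRange a (a + (n : Int)) 1).foldl (fun acc h => acc + (h + c)) init
      = 2 * init + 2 * (n : Int) * c + (n : Int) * (2 * a + (n : Int) - 1) := by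
  induction n with
  | zero => intro a init; simp [PySem.List.pyRange_one_eq_nil]
  | succ n ih =>
    intro a init
    rw [show a + ((n + 1 : Nat) : Int) = (a + (n : Int)) + 1 by push_cast; ring,
        PySem.List.pyRange_one_succ_right (by omega)]
    rw [List.foldl_append]
    simp only [List.foldl_cons, List.foldl_nil]
    have h2 := ih a init
    push_cast
    push_cast at h2
    linarith [h2]

-- ===== VERDICT (by name: the statement is the Claim_ definition above) =====
theorem mountains_of_hoiyama_spec : Claim_equal_mountains_of_hoiyama := by
  intro width _
  unfold Spec_mountains_of_hoiyama mountains_of_hoiyama mountains_of_hoiyama_alt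
  simp only []
  set k := PySem.Int.floordiv width 2 with hk
  have hke : k = width / 2 := PySem.Int.floordiv_eq_ediv_of_pos (by norm_num)
  by_cases hm : width - k - 1 ≤ 0
  · -- outer range empty on both sides
    rw [PySem.List.pyRange_one_eq_nil (by omega)]
    simp [hm]
  · -- width ≥ 2, so k ≥ 1 ≥ 0
    rw [not_le] at hm
    have hk0 : 0 ≤ k := by omega
    set m : Int := width - k - 1 with hmdef
    -- rewrite the inner fold by its closed value
    have hfun : (fun (weight h : Int) =>
        weight + (PySem.List.pyRange k 0 (-1)).foldl (fun wl w => wl + w * 2) h)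
        = (fun weight h => weight + (h + k * (k + 1))) := by
      funext weight h
      have := pv_inner k.toNat h
      rw [Int.toNat_of_nonneg hk0] at this
      rw [this]
    have hA : 2 * ((PySem.List.pyRange (k + 1) width 1).foldl
        (fun weight h => weight + (h + k * (k + 1))) width)
        = 2 * width + 2 * m * (k * (k + 1)) + m * (2 * (k + 1) + m - 1) := by
      have := pv_outer (k * (k + 1)) m.toNat (k + 1) width
      rw [Int.toNat_of_nonneg (by omega)] at this
      rw [show k + 1 + m = width by omega] at this
      exact this
    rw [hfun]
    -- evaluate B's floordiv: m*(2k+m+1) is even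
    obtain ⟨t, ht⟩ : ∃ t, m * (2 * k + m + 1) = 2 * t := by
      rcases Int.even_or_odd m with ⟨s, hs⟩ | ⟨s, hs⟩
      · exact ⟨s * (2 * k + m + 1), by rw [hs]; ring⟩
      · exact ⟨m * (k + s + 1), by rw [hs]; ring⟩
    have hfd : PySem.Int.floordiv (m * (2 * k + m + 1)) 2 = t := by
      rw [PySem.Int.floordiv_eq_ediv_of_pos (by norm_num), ht,
          Int.mul_ediv_cancel_left _ (by norm_num)]
    simp only [if_neg (by omega : ¬ m ≤ 0), hfd]
    nlinarith [hA, ht]
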